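-- pv_equiv track=rewrite | github.com/grigvlwork/py_prog | funreturn/horsemove.py | possible_turns
-- ===== SOURCE A (Python) =====
-- def strcort(c):
--     s = 'ABCDEFGH'
--     return s[c[0] - 1] + str(c[1])
--
-- def cortstr(s):
--     row = ord(s[0]) - ord('A') + 1
--     col = int(s[1])
--     return (row, col)
--
-- def infield(t):
--     if t[0] in range(1, 9) and t[1] in range(1, 9):
--         return True
--     return False
--
-- def possible_turns(cell):
--     d = [-2, -1, 1, 2]
--     pos = cortstr(cell)
--     moves = list()
--     for i in d:
--         for j in d:
--             if abs(i) != abs(j):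
--                 pret = (pos[0] + i, pos[1] + j)
--                 if infield(pret):
--                     moves.append(strcort(pret))
--     moves.sort()
--     return moves
-- ===== SOURCE B (Python) =====
-- # A knight move is exactly a step of squared Euclidean length 5, so scan the
-- # whole board in (letter, digit) order and keep the cells at squared distance 5
-- # from the source: the result comes out already sorted, no candidate offsets,
-- # no bounds checks, no final sort.
-- def possible_turns(cell):
--     row = ord(cell[0]) - ord('A') + 1
--     col = int(cell[1])
--     return [ch + str(c)
--             for r, ch in enumerate('ABCDEFGH', 1)
--             for c in range(1, 9)
--             if (r - row) ** 2 + (c - col) ** 2 == 5]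
-- ===== Notes on version B (the rewrite author's own statement) =====
-- stated objective: alternative
-- what changed: Instead of generating candidate offsets, bounds-checking and sorting, B scans all 64 board cells in (letter,digit) order and keeps those at squared Euclidean distance 5 from the source cell, so the output is emitted already sorted with no offset table, no bounds check and no sort.
import Mathlib
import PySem

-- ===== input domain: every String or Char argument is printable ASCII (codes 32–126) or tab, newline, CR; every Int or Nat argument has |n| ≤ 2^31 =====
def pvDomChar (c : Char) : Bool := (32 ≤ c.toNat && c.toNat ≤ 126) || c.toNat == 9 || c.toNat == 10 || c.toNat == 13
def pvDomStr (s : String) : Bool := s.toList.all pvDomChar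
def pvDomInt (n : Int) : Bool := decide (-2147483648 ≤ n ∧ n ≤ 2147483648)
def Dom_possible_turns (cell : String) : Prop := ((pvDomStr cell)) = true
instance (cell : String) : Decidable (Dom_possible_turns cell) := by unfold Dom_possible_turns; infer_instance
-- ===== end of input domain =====

-- B replaces A's offset enumeration + sort by a scan of all 64 board cells keeping those at
-- squared distance 5 from the source; board order is already sorted, so no sort is performed.


-- ===== PORT A =====
-- strcort(c) = 'ABCDEFGH'[c[0]-1] + str(c[1])
def ptStrcort (c : Int × Int) : String :=
  -- c[0] ∈ 1..8 at every call site (guarded by infield), so the getD default is unreachable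
  String.mk ([(PySem.List.pyGet? "ABCDEFGH".toList (c.1 - 1)).getD 'A'] ++ PySem.Int.toChars c.2)

-- cortstr(s): row = ord(s[0]) - ord('A') + 1, col = int(s[1])
def ptCortstr (s : String) : Int × Int :=
  -- Pre_ rules out IndexError (len ≥ 2) and ValueError (s[1] a digit), so the getD defaults are unreachable
  let c0 := (PySem.List.pyGet? s.toList 0).getD 'A'
  let c1 := (PySem.List.pyGet? s.toList 1).getD '0'
  (((c0.toNat : Int) - ('A'.toNat : Int) + 1), (PySem.Int.ofChars? [c1]).getD 0)

-- infield(t) = t[0] in range(1,9) and t[1] in range(1,9)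
def ptInfield (t : Int × Int) : Bool :=
  (PySem.List.pyRange 1 9 1).contains t.1 && (PySem.List.pyRange 1 9 1).contains t.2

def possible_turns (cell : String) : List String :=
  let d : List Int := [-2, -1, 1, 2]
  let pos := ptCortstr cell
  let moves := d.foldl (fun moves i =>
    d.foldl (fun moves j =>
      if i.natAbs ≠ j.natAbs then
        let pret := (pos.1 + i, pos.2 + j)
        if ptInfield pret then moves ++ [ptStrcort pret] else moves
      else moves) moves) []
  -- Python's str '<' is '<' on String.toList (PySem str-comparison rule); sorting keyed through
  -- toList is the same order and lets the kernel evaluate the comparisons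
  PySem.List.sorted moves (fun x => x.toList) false

-- ===== PORT B =====
def possible_turns_alt (cell : String) : List String :=
  -- same unreachable getD defaults as port A's parsing (see Pre_)
  let c0 := (PySem.List.pyGet? cell.toList 0).getD 'A'
  let c1 := (PySem.List.pyGet? cell.toList 1).getD '0'
  let row : Int := (c0.toNat : Int) - ('A'.toNat : Int) + 1
  let col : Int := (PySem.Int.ofChars? [c1]).getD 0
  -- 'for r, ch in enumerate("ABCDEFGH", 1)' = zip of range(1,9) with the letters
  ((PySem.List.pyRange 1 9 1).zip "ABCDEFGH".toList).flatMap (fun rc =>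
    (PySem.List.pyRange 1 9 1).flatMap (fun c =>
      if (rc.1 - row) ^ 2 + (c - col) ^ 2 = 5
      then [String.mk (rc.2 :: PySem.Int.toChars c)] else []))

-- ===== PRECONDITION & SPEC =====
-- Pre_ excludes exactly the inputs where A raises: len < 2 (IndexError) and a non-digit
-- second character (ValueError in int(s[1])).
def Pre_possible_turns (cell : String) : Prop :=
  2 ≤ cell.toList.length ∧ (cell.toList.getD 1 ' ').isDigit = true
instance (cell : String) : Decidable (Pre_possible_turns cell) := by unfold Pre_possible_turns; infer_instance
def pvWitness_possible_turns : String := "D4"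

def Spec_possible_turns (cell : String) (out : List String) : Prop := out = possible_turns_alt cell
instance (cell : String) (out : List String) : Decidable (Spec_possible_turns cell out) := by unfold Spec_possible_turns; infer_instance

-- ===== CLAIM (what is proved, stated in full; the proofs are below) =====
def Claim_equal_possible_turns : Prop := ∀ (cell : String), Dom_possible_turns cell → Pre_possible_turns cell → Spec_possible_turns cell (possible_turns cell)

-- ===== LEMMAS AND PROOFS =====
-- the core of each port as a function of the parsed (row, col); each is definitionally
-- the body of its port after the (identical) parsing lets
def ptCoreA (r c : Int) : List String :=
  PySem.List.sorted (([-2, -1, 1, 2] : List Int).foldl (fun moves i =>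
    ([-2, -1, 1, 2] : List Int).foldl (fun moves j =>
      if i.natAbs ≠ j.natAbs then
        if ptInfield (r + i, c + j) then moves ++ [ptStrcort (r + i, c + j)] else moves
      else moves) moves) []) (fun x => x.toList) false

def ptCoreB (r c : Int) : List String :=
  ((PySem.List.pyRange 1 9 1).zip "ABCDEFGH".toList).flatMap (fun rc =>
    (PySem.List.pyRange 1 9 1).flatMap (fun cc =>
      if (rc.1 - r) ^ 2 + (cc - c) ^ 2 = 5
      then [String.mk (rc.2 :: PySem.Int.toChars cc)] else []))

lemma ptInfield_eq (t : Int × Int) :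
    ptInfield t = decide (1 ≤ t.1 ∧ t.1 ≤ 8 ∧ 1 ≤ t.2 ∧ t.2 ≤ 8) := by
  obtain ⟨a, b⟩ := t
  have h : PySem.List.pyRange 1 9 1 = [1,2,3,4,5,6,7,8] := rfl
  simp only [ptInfield, h, List.contains_cons, List.contains_nil, Bool.or_false]
  rw [Bool.eq_iff_iff]
  simp only [Bool.and_eq_true, Bool.or_eq_true, beq_iff_eq, decide_eq_true_eq]
  omega

lemma ptCoreA_empty (r c : Int) (h : r < -1 ∨ 10 < r ∨ c < -1 ∨ 10 < c) : ptCoreA r c = [] := by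
  have hx : ∀ i j : Int, i.natAbs ≤ 2 → j.natAbs ≤ 2 → ptInfield (r + i, c + j) = false := by
    intro i j hi hj
    rw [ptInfield_eq]
    simp only [decide_eq_false_iff_not]
    omega
  simp [ptCoreA, hx, PySem.List.sorted]

lemma ptCoreB_empty (r c : Int) (h : r < -1 ∨ 10 < r ∨ c < -1 ∨ 10 < c) : ptCoreB r c = [] := by
  have hx : ∀ rr cc : Int, 1 ≤ rr → rr ≤ 8 → 1 ≤ cc → cc ≤ 8 →
      ¬((rr - r) ^ 2 + (cc - c) ^ 2 = 5) := by
    intro rr cc hr1 hr2 hc1 hc2 heq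
    rcases h with h | h | h | h
    · have hd : 3 ≤ rr - r := by omega
      nlinarith [sq_nonneg (cc - c)]
    · have hd : rr - r ≤ -3 := by omega
      nlinarith [sq_nonneg (cc - c)]
    · have hd : 3 ≤ cc - c := by omega
      nlinarith [sq_nonneg (rr - r)]
    · have hd : cc - c ≤ -3 := by omega
      nlinarith [sq_nonneg (rr - r)]
  have hr : PySem.List.pyRange 1 9 1 = [1,2,3,4,5,6,7,8] := rfl
  simp [ptCoreB, hr]
  repeat' apply And.intro
  all_goals exact hx _ _ (by norm_num) (by norm_num) (by norm_num) (by norm_num)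

lemma ptCore_eq (r c : Int) : ptCoreA r c = ptCoreB r c := by
  by_cases hbox : -1 ≤ r ∧ r ≤ 10 ∧ -1 ≤ c ∧ c ≤ 10
  · obtain ⟨h1, h2, h3, h4⟩ := hbox
    interval_cases r <;> interval_cases c <;> decide
  · rw [ptCoreA_empty r c (by omega), ptCoreB_empty r c (by omega)]

-- ===== VERDICT (by name: the statement is the Claim_ definition above) =====
theorem possible_turns_spec : Claim_equal_possible_turns := by
  intro cell _ _
  unfold Spec_possible_turns possible_turns possible_turns_alt ptCortstr
  exact ptCore_eq _ _
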